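-- pv_equiv track=rewrite | github.com/kkr010128/codebert | problem277/problem277_76.py | cv
-- ===== SOURCE A (Python) =====
-- def cv(S,cn,pr):
--   SS=S
--   ans = []
--   for i in range(cn):
--     ans += [pr+i+1]*(SS.find("#")+1)
--     if SS.find("#")<len(SS):
--       SS = SS[SS.find("#")+1:]
--     else:
--       SS = ""
--   ans += [pr+cn]*len(SS)
--   return ans
-- ===== SOURCE B (Python) =====
-- def cv(S, cn, pr):
--     t = S.count('#')
--     ans = []
--     k = 0
--     for ch in S:
--         ans.append(pr + min(k + 1, cn) if k < t else pr + cn)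
--         if ch == '#':
--             k += 1
--     return ans
-- ===== Notes on version B (the rewrite author's own statement) =====
-- stated objective: faster
-- what changed: A loops cn times, re-scanning and re-slicing the remaining string with find('#') each iteration; B counts '#' once and makes a single pass over S with a running '#' counter, computing each label directly.
import Mathlib
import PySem

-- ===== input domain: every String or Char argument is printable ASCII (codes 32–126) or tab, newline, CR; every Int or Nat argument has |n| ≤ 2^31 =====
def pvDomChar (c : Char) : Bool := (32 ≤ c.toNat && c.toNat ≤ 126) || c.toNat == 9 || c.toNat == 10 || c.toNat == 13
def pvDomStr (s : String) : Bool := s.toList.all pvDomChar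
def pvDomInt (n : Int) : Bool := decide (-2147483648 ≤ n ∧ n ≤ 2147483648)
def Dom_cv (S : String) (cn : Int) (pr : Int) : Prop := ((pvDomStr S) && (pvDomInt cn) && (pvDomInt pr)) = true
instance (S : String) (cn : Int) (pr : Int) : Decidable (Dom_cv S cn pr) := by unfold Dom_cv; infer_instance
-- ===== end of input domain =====

-- B replaces A's cn-iteration find-and-slice loop by a single pass over S with a running
-- '#' counter (objective: faster — A re-scans and re-slices the remaining string each iteration).

-- ===== PORT A =====
-- one loop step of A; i is the range index, state = (SS, ans);
-- '[v]*(f+1)' is List.replicate (f+1).toNat v (Python list-repeat clamps at 0; exact since f ≥ -1);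
-- 'SS[SS.find("#")+1:]' is PySem.List.slice SS (some (f+1)) none.
def cvStep (pr : Int) (st : List Char × List Int) (i : Int) : List Char × List Int :=
  let f := PySem.Chars.find st.1 ['#']
  let ans := st.2 ++ List.replicate (f + 1).toNat (pr + i + 1)
  if f < (st.1.length : Int) then (PySem.List.slice st.1 (some (f + 1)) none, ans)
  else ([], ans)

def cv (S : String) (cn : Int) (pr : Int) : List Int :=
  let r := (PySem.List.pyRange 0 cn 1).foldl (cvStep pr) (S.toList, [])
  r.2 ++ List.replicate r.1.length (pr + cn)

-- ===== PORT B =====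
-- one pass; state = (ans, k) where k counts the '#' seen so far; t = S.count('#')
def cvAltStep (t cn pr : Int) (st : List Int × Int) (ch : Char) : List Int × Int :=
  (st.1 ++ [if st.2 < t then pr + min (st.2 + 1) cn else pr + cn],
   if ch = '#' then st.2 + 1 else st.2)

def cv_alt (S : String) (cn : Int) (pr : Int) : List Int :=
  let t : Int := (PySem.Str.count S "#" : Int)
  (S.toList.foldl (cvAltStep t cn pr) ([], 0)).1

-- ===== PRECONDITION & SPEC =====
def Spec_cv (S : String) (cn : Int) (pr : Int) (out : List Int) : Prop := out = cv_alt S cn pr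
instance (S : String) (cn : Int) (pr : Int) (out : List Int) : Decidable (Spec_cv S cn pr out) := by unfold Spec_cv; infer_instance

-- ===== CLAIM (what is proved, stated in full; the proofs are below) =====
def Claim_equal_cv : Prop := ∀ (S : String) (cn : Int) (pr : Int), Dom_cv S cn pr → Spec_cv S cn pr (cv S cn pr)

-- ===== LEMMAS AND PROOFS =====

-- Python's s.count(c) for a single character is the list count
theorem count_singleton (s : List Char) (c : Char) :
    PySem.Chars.count s [c] = s.count c := by
  have go_eq : ∀ (fuel : Nat) (s : List Char) (acc : Nat), s.length ≤ fuel →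
      PySem.Chars.count.go [c] fuel s acc = acc + s.count c := by
    intro fuel
    induction fuel with
    | zero =>
        intro s acc h
        have : s = [] := List.eq_nil_of_length_eq_zero (by omega)
        subst this; simp [PySem.Chars.count.go]
    | succ fuel ih =>
        intro s acc h
        cases s with
        | nil => simp [PySem.Chars.count.go]
        | cons a t =>
            simp only [PySem.Chars.count.go, List.isPrefixOf, List.count_cons]
            by_cases hca : c = a
            · subst hca
              simp only [beq_self_eq_true, Bool.true_and, if_true,
                         List.length_singleton, List.drop_one, List.tail_cons]
              rw [ih t (acc + 1) (by simpa using h)]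
              omega
            · have hb : (c == a) = false := beq_eq_false_iff_ne.mpr hca
              simp only [hb, Bool.false_and, if_false]
              rw [ih t acc (by simpa using h)]
              simp [Ne.symm hca]
  simp [PySem.Chars.count, go_eq s.length s 0 le_rfl]

-- the labels B emits on cs with counter k (proof-side recursion describing B's fold)
def emit (t cn pr : Int) : List Char → Int → List Int
  | [], _ => []
  | c :: cs, k =>
      (if k < t then pr + min (k + 1) cn else pr + cn) :: emit t cn pr cs (if c = '#' then k + 1 else k)

theorem foldl_cvAltStep (t cn pr : Int) (cs : List Char) (ans : List Int) (k : Int) :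
    cs.foldl (cvAltStep t cn pr) (ans, k) = (ans ++ emit t cn pr cs k, k + (cs.count '#' : Int)) := by
  induction cs generalizing ans k with
  | nil => simp [emit]
  | cons c cs ih =>
      simp only [List.foldl_cons, cvAltStep, emit, ih, List.count_cons]
      by_cases h : c = '#' <;> simp [h] <;> push_cast <;> ring_nf

theorem emit_of_cn_le (t cn pr : Int) (cs : List Char) (k : Int) (h : cn ≤ k) :
    emit t cn pr cs k = List.replicate cs.length (pr + cn) := by
  induction cs generalizing k with
  | nil => simp [emit]
  | cons c cs ih =>
      have h1 : min (k + 1) cn = cn := by omega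
      simp only [emit, h1, ite_self, List.length_cons, List.replicate_succ]
      congr 1
      split <;> exact ih _ (by omega)

theorem emit_of_no_hash (t cn pr : Int) (cs : List Char) (k : Int) (hm : '#' ∉ cs) (h : t ≤ k) :
    emit t cn pr cs k = List.replicate cs.length (pr + cn) := by
  induction cs with
  | nil => simp [emit]
  | cons c cs ih =>
      simp only [List.mem_cons, not_or] at hm
      have hk : ¬ (k < t) := by omega
      have hc : c ≠ '#' := fun hh => hm.1 hh.symm
      simp [emit, hk, List.replicate_succ, hc, ih hm.2]

theorem emit_split (t cn pr : Int) (u v : List Char) (k : Int)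
    (hu : '#' ∉ u) (hk : k < t) (hc : k + 1 ≤ cn) :
    emit t cn pr (u ++ '#' :: v) k =
      List.replicate (u.length + 1) (pr + (k + 1)) ++ emit t cn pr v (k + 1) := by
  have hmin : min (k + 1) cn = k + 1 := by omega
  induction u with
  | nil => simp [emit, hk, hmin]
  | cons c u ih =>
      simp only [List.mem_cons, not_or] at hu
      have hc : c ≠ '#' := fun hh => hu.1 hh.symm
      simp only [List.cons_append, emit, hk, if_pos, hmin, hc, if_false,
                 List.length_cons]
      rw [ih hu.2]
      simp [List.replicate_succ]

-- the whole of A seen from loop index a, with current remainder SS and accumulated ans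
def F (cn pr a : Int) (SS : List Char) (ans : List Int) : List Int :=
  ((PySem.List.pyRange a cn 1).foldl (cvStep pr) (SS, ans)).2 ++
    List.replicate ((PySem.List.pyRange a cn 1).foldl (cvStep pr) (SS, ans)).1.length (pr + cn)

theorem singleton_infix_of_mem {c : Char} {l : List Char} (h : c ∈ l) : [c] <:+: l := by
  obtain ⟨s, t, rfl⟩ := List.append_of_mem h
  exact ⟨s, t, by simp⟩

theorem find_decomp (SS : List Char) (n : Nat)
    (h : PySem.Chars.find SS ['#'] = (n : Int)) :
    SS = SS.take n ++ '#' :: SS.drop (n + 1) ∧ '#' ∉ SS.take n ∧ n < SS.length := by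
  have h0 : 0 ≤ PySem.Chars.find SS ['#'] := by rw [h]; exact_mod_cast Int.natCast_nonneg n
  obtain ⟨hpre, hmin⟩ := PySem.Chars.find_spec h0
  rw [h] at hpre hmin
  simp only [Int.toNat_natCast] at hpre hmin
  obtain ⟨rest, hrest⟩ := hpre
  have hdropn : SS.drop n = '#' :: rest := by simpa using hrest.symm
  have hlen : n < SS.length := by
    by_contra hge
    rw [List.drop_eq_nil_of_le (by omega)] at hdropn
    simp at hdropn
  refine ⟨?_, ?_, hlen⟩
  · have h1 : SS.drop (n + 1) = rest := by
      rw [← List.tail_drop, hdropn]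
      rfl
    rw [h1, ← hdropn]
    exact (List.take_append_drop n SS).symm
  · intro hmem
    obtain ⟨j, hj, hget⟩ := List.getElem_of_mem hmem
    rw [List.length_take] at hj
    have hjlt : j < n := by omega
    have hjlen : j < SS.length := by omega
    apply hmin j hjlt
    have hget' : SS[j]'hjlen = '#' := by
      rw [← hget]; simp [List.getElem_take]
    refine ⟨SS.drop (j + 1), ?_⟩
    rw [← hget']
    simpa using (List.getElem_cons_drop (l := SS) (i := j) hjlen).symm

theorem F_key (cn pr : Int) : ∀ (m : Nat) (a : Int) (SS : List Char) (ans : List Int),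
    (cn - a).toNat = m →
    F cn pr a SS ans = ans ++ emit (a + (SS.count '#' : Int)) cn pr SS a := by
  intro m
  induction m with
  | zero =>
      intro a SS ans hm
      have hle : cn ≤ a := by omega
      rw [F, PySem.List.pyRange_one_eq_nil hle]
      simp only [List.foldl_nil]
      rw [emit_of_cn_le _ _ _ _ _ hle]
  | succ m ih =>
      intro a SS ans hm
      have halt : a < cn := by omega
      rw [F, PySem.List.pyRange_one_cons halt, List.foldl_cons]
      by_cases hneg : PySem.Chars.find SS ['#'] = -1
      · -- no '#': nothing is appended and SS is unchanged (SS[0:] = SS)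
        have hnm : ¬ (['#'] <:+: SS) := (PySem.Chars.find_eq_neg_one_iff SS ['#']).mp hneg
        have hno : '#' ∉ SS := fun hmem => hnm (singleton_infix_of_mem hmem)
        have hcond : (-1 : Int) < (SS.length : Int) := by
          have : (0 : Int) ≤ (SS.length : Int) := Int.natCast_nonneg _
          omega
        have hstep : cvStep pr (SS, ans) a = (SS, ans) := by
          simp [cvStep, hneg, hcond, PySem.List.slice_none_none,
                show ((-1 : Int) + 1) = 0 by norm_num]
        rw [hstep]
        have hrec := ih (a + 1) SS ans (by omega)
        rw [F] at hrec
        rw [hrec]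
        have hc0 : SS.count '#' = 0 := List.count_eq_zero.mpr hno
        rw [hc0]
        congr 1
        rw [emit_of_no_hash _ _ _ _ _ hno (by simp),
            emit_of_no_hash _ _ _ _ _ hno (by simp)]
      · -- '#' found at index n: emit the segment, drop it, continue
        have hf1 := PySem.Chars.neg_one_le_find SS ['#']
        have h0 : 0 ≤ PySem.Chars.find SS ['#'] := by omega
        obtain ⟨n, hn⟩ : ∃ n : Nat, PySem.Chars.find SS ['#'] = (n : Int) :=
          ⟨(PySem.Chars.find SS ['#']).toNat, (Int.toNat_of_nonneg h0).symm⟩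
        obtain ⟨hdec, hnotake, hlen⟩ := find_decomp SS n hn
        have hlt : (n : Int) < (SS.length : Int) := by exact_mod_cast hlen
        have hstep : cvStep pr (SS, ans) a =
            (SS.drop (n + 1), ans ++ List.replicate (n + 1) (pr + a + 1)) := by
          simp only [cvStep, hn, if_pos hlt]
          rw [show ((n : Int) + 1) = ((n + 1 : Nat) : Int) by push_cast; ring]
          rw [PySem.List.slice_from_natCast, Int.toNat_natCast]
        rw [hstep]
        have hrec := ih (a + 1) (SS.drop (n + 1)) (ans ++ List.replicate (n + 1) (pr + a + 1)) (by omega)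
        rw [F] at hrec
        rw [hrec]
        have htake0 : (SS.take n).count '#' = 0 := List.count_eq_zero.mpr hnotake
        have hcount : (SS.count '#' : Int) = (((SS.drop (n + 1)).count '#' : Int)) + 1 := by
          conv_lhs => rw [hdec]
          push_cast [List.count_append, List.count_cons, htake0]
          simp
        have hteq : a + 1 + ((SS.drop (n + 1)).count '#' : Int) = a + (SS.count '#' : Int) := by
          rw [hcount]; ring
        rw [hteq, List.append_assoc]
        congr 1
        set t0 := a + ((SS.count '#' : Nat) : Int) with ht0
        conv_rhs => rw [hdec]
        rw [emit_split t0 cn pr _ _ _ hnotake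
              (by rw [ht0, hcount]
                  have := Int.natCast_nonneg ((SS.drop (n + 1)).count '#')
                  omega)
              (by omega)]
        have hulen : (SS.take n).length = n := by rw [List.length_take]; omega
        rw [hulen]
        congr 2
        ring

-- ===== VERDICT (by name: the statement is the Claim_ definition above) =====
theorem cv_spec : Claim_equal_cv := by
  intro S cn pr _
  unfold Spec_cv
  have hA : cv S cn pr = F cn pr 0 S.toList [] := rfl
  rw [hA, F_key cn pr (cn - 0).toNat 0 S.toList [] rfl]
  show _ = cv_alt S cn pr
  simp only [cv_alt]
  rw [foldl_cvAltStep]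
  simp [PySem.Str.count_eq, count_singleton, show ("#" : String).toList = ['#'] from rfl]
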